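-- pv_equiv track=rewrite | github.com/MiladAlshomary/latent-space-interpretation-for-stylistic-analysis | utils/__init__.py | word_difference
-- ===== SOURCE A (Python) =====
-- def word_difference(sentence1, sentence2):
--     words1 = sentence1.split()
--     words2 = sentence2.split()
--
--     # Pad the shorter list with empty strings to make the lengths equal
--     max_len = max(len(words1), len(words2))
--     words1.extend([""] * (max_len - len(words1)))
--     words2.extend([""] * (max_len - len(words2)))
--
--     # Count the number of differing words
--     difference_count = sum(1 for w1, w2 in zip(words1, words2) if w1 != w2)
--
--     return difference_count
-- ===== SOURCE B (Python) =====
-- def word_difference(sentence1, sentence2):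
--     # Count AGREEMENTS recursively over the two word lists and subtract from the
--     # larger length: every position beyond the shorter list can never agree
--     # (split() never yields empty words), so max_len - agreements is exactly the
--     # number of differing positions.
--     def agreements(ws1, ws2):
--         if not ws1 or not ws2:
--             return 0
--         return (ws1[0] == ws2[0]) + agreements(ws1[1:], ws2[1:])
--
--     words1 = sentence1.split()
--     words2 = sentence2.split()
--     return max(len(words1), len(words2)) - agreements(words1, words2)
-- ===== Notes on version B (the rewrite author's own statement) =====
-- stated objective: alternative
-- what changed: Instead of padding both lists and counting mismatches in one zip pass, B recursively counts the positions where the words AGREE and returns max(len(words1), len(words2)) minus that count (complement counting; valid since split() never yields empty words, so no padded position can agree).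
import Mathlib
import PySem

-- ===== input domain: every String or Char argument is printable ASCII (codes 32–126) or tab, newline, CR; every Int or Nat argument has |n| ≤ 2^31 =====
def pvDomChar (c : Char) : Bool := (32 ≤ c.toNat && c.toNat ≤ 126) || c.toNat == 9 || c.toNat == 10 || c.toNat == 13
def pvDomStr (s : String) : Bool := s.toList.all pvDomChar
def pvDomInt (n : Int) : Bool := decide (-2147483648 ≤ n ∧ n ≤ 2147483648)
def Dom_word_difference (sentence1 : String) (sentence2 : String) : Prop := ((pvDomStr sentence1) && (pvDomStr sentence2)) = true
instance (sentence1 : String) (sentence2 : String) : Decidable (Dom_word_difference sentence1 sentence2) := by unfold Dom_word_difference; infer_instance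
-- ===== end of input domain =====

-- B replaces A's pad-then-count-mismatches with complement counting: a recursive count of
-- the positions where the words AGREE, subtracted from the larger word count (alternative).

-- ===== PORT A =====
def word_difference (sentence1 : String) (sentence2 : String) : Int :=
  let words1 := PySem.Str.split₀ sentence1
  let words2 := PySem.Str.split₀ sentence2
  let maxLen := max words1.length words2.length
  let words1 := words1 ++ List.replicate (maxLen - words1.length) ""
  let words2 := words2 ++ List.replicate (maxLen - words2.length) ""
  (words1.zip words2).foldl (fun acc p => if p.1 != p.2 then acc + 1 else acc) (0 : Int)

-- ===== PORT B =====
-- Source B's recursive helper `agreements`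
def wdAgreements : List String → List String → Nat
  | [], _ => 0
  | _ :: _, [] => 0
  | a :: t1, b :: t2 => (if a == b then 1 else 0) + wdAgreements t1 t2

def word_difference_alt (sentence1 : String) (sentence2 : String) : Int :=
  let words1 := PySem.Str.split₀ sentence1
  let words2 := PySem.Str.split₀ sentence2
  ((max words1.length words2.length : Nat) : Int) - (wdAgreements words1 words2 : Int)

-- ===== PRECONDITION & SPEC =====
def Spec_word_difference (sentence1 : String) (sentence2 : String) (out : Int) : Prop := out = word_difference_alt sentence1 sentence2
instance (sentence1 : String) (sentence2 : String) (out : Int) : Decidable (Spec_word_difference sentence1 sentence2 out) := by unfold Spec_word_difference; infer_instance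

-- ===== CLAIM (what is proved, stated in full; the proofs are below) =====
def Claim_equal_word_difference : Prop := ∀ (sentence1 : String) (sentence2 : String), Dom_word_difference sentence1 sentence2 → Spec_word_difference sentence1 sentence2 (word_difference sentence1 sentence2)

-- ===== LEMMAS AND PROOFS =====

-- every word produced by split₀.go is a nonempty list of characters
theorem split0_go_ne_nil (s : List Char) : ∀ (cur : List Char) (acc : List (List Char)),
    (∀ w ∈ acc, w ≠ []) → ∀ w ∈ PySem.Chars.split₀.go s cur acc, w ≠ [] := by
  induction s with
  | nil =>
    intro cur acc hacc w hw
    have hgo : PySem.Chars.split₀.go [] cur acc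
        = if cur.isEmpty then acc.reverse else (cur.reverse :: acc).reverse := rfl
    rw [hgo] at hw
    split at hw
    · exact hacc w (by simpa using hw)
    · rename_i hcur
      rcases (by simpa using hw : w ∈ acc ∨ w = cur.reverse) with h | h
      · exact hacc w h
      · subst h
        simp only [Bool.not_eq_true, List.isEmpty_eq_false_iff] at hcur
        simpa using hcur
  | cons c rest ih =>
    intro cur acc hacc w hw
    have hgo : PySem.Chars.split₀.go (c :: rest) cur acc
        = if PySem.Chars.isspace c then
            (if cur.isEmpty then PySem.Chars.split₀.go rest [] acc
             else PySem.Chars.split₀.go rest [] (cur.reverse :: acc))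
          else PySem.Chars.split₀.go rest (c :: cur) acc := rfl
    rw [hgo] at hw
    split at hw
    · split at hw
      · exact ih [] acc hacc w hw
      · rename_i hcur
        refine ih [] (cur.reverse :: acc) ?_ w hw
        intro u hu
        rcases List.mem_cons.mp hu with h | h
        · subst h
          simp only [Bool.not_eq_true, List.isEmpty_eq_false_iff] at hcur
          simpa using hcur
        · exact hacc u h
    · exact ih (c :: cur) acc hacc w hw

-- every word of Python's str.split() is a nonempty string
theorem split0_ne_empty (s : String) : ∀ w ∈ PySem.Str.split₀ s, w ≠ "" := by
  intro w hw
  simp only [PySem.Str.split₀, List.mem_map] at hw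
  obtain ⟨cs, hcs, rfl⟩ := hw
  have hne : cs ≠ [] := split0_go_ne_nil s.toList [] [] (by simp) cs hcs
  intro h
  apply hne
  have := congrArg String.toList h
  simpa using this

-- B's recursive agreement count is the countP of equal pairs over the zip
theorem wdAgreements_eq_countP (l1 l2 : List String) :
    wdAgreements l1 l2 = (l1.zip l2).countP (fun p => p.1 == p.2) := by
  induction l1 generalizing l2 with
  | nil => simp [wdAgreements]
  | cons a t1 ih =>
    cases l2 with
    | nil => simp [wdAgreements]
    | cons b t2 =>
      simp only [wdAgreements, List.zip_cons_cons, List.countP_cons, ih]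
      rcases Bool.eq_false_or_eq_true (a == b) with hb | hb <;> simp [hb] <;> omega

-- agreements + mismatches over the same zip is the zip's length
theorem count_eq_add_ne (l : List (String × String)) :
    l.countP (fun p => p.1 == p.2) + l.countP (fun p => p.1 != p.2) = l.length := by
  induction l with
  | nil => simp
  | cons p t ih =>
    simp only [List.countP_cons]
    rcases Bool.eq_false_or_eq_true (p.1 == p.2) with hb | hb <;>
      simp [hb, bne, ← ih] <;> omega

-- a list of nonempty words zipped against all-"" padding mismatches everywhere
theorem rep_zip_count (l : List String) (hne : ∀ w ∈ l, w ≠ "") :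
    ((List.replicate l.length "").zip l).countP (fun p => p.1 != p.2) = l.length := by
  induction l with
  | nil => simp
  | cons b t ih =>
    have hb : ("" != b) = true := by
      simpa [bne_iff_ne] using (hne b (by simp)).symm
    simp only [List.length_cons, List.replicate_succ, List.zip_cons_cons, List.countP_cons, hb]
    rw [ih (fun w hw => hne w (List.mem_cons_of_mem _ hw))]
    simp

theorem rep_zip_count' (l : List String) (hne : ∀ w ∈ l, w ≠ "") :
    (l.zip (List.replicate l.length "")).countP (fun p => p.1 != p.2) = l.length := by
  induction l with
  | nil => simp
  | cons b t ih =>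
    have hb : (b != "") = true := by
      simpa [bne_iff_ne] using hne b (by simp)
    simp only [List.length_cons, List.replicate_succ, List.zip_cons_cons, List.countP_cons, hb]
    rw [ih (fun w hw => hne w (List.mem_cons_of_mem _ hw))]
    simp

-- zipping the shorter list padded with "" against a longer all-nonempty list adds one
-- mismatch per padding element
theorem pad_count (l1 l2 : List String) (h : l1.length ≤ l2.length)
    (hne : ∀ w ∈ l2, w ≠ "") :
    ((l1 ++ List.replicate (l2.length - l1.length) "").zip l2).countP (fun p => p.1 != p.2)
      = (l1.zip l2).countP (fun p => p.1 != p.2) + (l2.length - l1.length) := by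
  induction l1 generalizing l2 with
  | nil =>
    simpa using rep_zip_count l2 hne
  | cons a t1 ih =>
    cases l2 with
    | nil => simp at h
    | cons b t2 =>
      simp only [List.length_cons, List.cons_append, List.zip_cons_cons, List.countP_cons,
        Nat.succ_sub_succ]
      rw [ih t2 (by simpa using h) (fun w hw => hne w (List.mem_cons_of_mem _ hw))]
      rcases Bool.eq_false_or_eq_true (a != b) with hb | hb <;> simp [hb] <;> omega

-- symmetric version: the longer list zipped against the padded shorter one
theorem pad_count' (l1 l2 : List String) (h : l2.length ≤ l1.length)
    (hne : ∀ w ∈ l1, w ≠ "") :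
    (l1.zip (l2 ++ List.replicate (l1.length - l2.length) "")).countP (fun p => p.1 != p.2)
      = (l1.zip l2).countP (fun p => p.1 != p.2) + (l1.length - l2.length) := by
  induction l2 generalizing l1 with
  | nil =>
    simpa using rep_zip_count' l1 hne
  | cons a t2 ih =>
    cases l1 with
    | nil => simp at h
    | cons b t1 =>
      simp only [List.length_cons, List.cons_append, List.zip_cons_cons, List.countP_cons,
        Nat.succ_sub_succ]
      rw [ih t1 (by simpa using h) (fun w hw => hne w (List.mem_cons_of_mem _ hw))]
      rcases Bool.eq_false_or_eq_true (b != a) with hb | hb <;> simp [hb] <;> omega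

-- ===== VERDICT (by name: the statement is the Claim_ definition above) =====
theorem word_difference_spec : Claim_equal_word_difference := by
  intro s1 s2 _
  unfold Spec_word_difference word_difference word_difference_alt
  simp only
  set l1 := PySem.Str.split₀ s1 with hl1
  set l2 := PySem.Str.split₀ s2 with hl2
  rw [PySem.List.foldl_count_if, wdAgreements_eq_countP]
  have hzipcnt := count_eq_add_ne (l1.zip l2)
  have hziplen : (l1.zip l2).length = min l1.length l2.length := List.length_zip ..
  rcases Nat.le_total l1.length l2.length with h | h
  · rw [Nat.max_eq_right h, Nat.sub_self, List.replicate_zero, List.append_nil,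
      pad_count l1 l2 h (split0_ne_empty s2)]
    omega
  · rw [Nat.max_eq_left h, Nat.sub_self, List.replicate_zero, List.append_nil,
      pad_count' l1 l2 h (split0_ne_empty s1)]
    omega
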